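-- pv_equiv track=rewrite | github.com/AdamZhouSE/pythonHomework | Code/CodeRecords/2690/60614/277230.py | check
-- ===== SOURCE A (Python) =====
-- def check(remainingStr,remainingKey):
--     if len(remainingKey)==0:
--         return 1
--     else:
--         keyNow=remainingKey[0]
--         count=0
--         for i in range(len(remainingStr)):
--             if remainingStr[i]==keyNow:
--                 count+=check(remainingStr[i:],remainingKey[1:])
--         return count
-- ===== SOURCE B (Python) =====
-- def check(remainingStr, remainingKey):
--     # suffix DP: f[p] = number of matchings of the remaining key in remainingStr[p:]
--     n = len(remainingStr)
--     f = [1] * (n + 1)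
--     for c in reversed(remainingKey):
--         g = [0] * (n + 1)
--         for p in range(n - 1, -1, -1):
--             g[p] = g[p + 1] + (f[p] if remainingStr[p] == c else 0)
--         f = g
--     return f[0]
-- ===== Notes on version B (the rewrite author's own statement) =====
-- stated objective: faster
-- what changed: Replaced A's exponential recursion over suffix slices with a bottom-up suffix-sum dynamic programme over (key position, string position), computed with two rolling arrays.
import Mathlib
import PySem

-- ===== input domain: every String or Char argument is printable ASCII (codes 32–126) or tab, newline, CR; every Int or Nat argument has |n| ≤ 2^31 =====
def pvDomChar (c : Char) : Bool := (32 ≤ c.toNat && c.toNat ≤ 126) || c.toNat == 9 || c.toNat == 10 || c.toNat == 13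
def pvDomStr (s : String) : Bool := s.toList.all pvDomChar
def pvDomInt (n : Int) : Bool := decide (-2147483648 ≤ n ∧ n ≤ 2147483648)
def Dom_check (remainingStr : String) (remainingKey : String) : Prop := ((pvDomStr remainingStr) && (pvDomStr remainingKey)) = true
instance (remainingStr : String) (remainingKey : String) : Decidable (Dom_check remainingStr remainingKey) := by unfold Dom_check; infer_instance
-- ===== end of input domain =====

-- B replaces A's exponential recursion over suffixes by a bottom-up O(n*m) suffix-sum DP.

-- ===== PORT A =====
-- A on char lists: for key k::ks, loop i over range(len s), adding check(s[i:], ks) when s[i]==k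
def checkL (s : List Char) (key : List Char) : Int :=
  match key with
  | [] => 1
  | k :: ks =>
    (List.range s.length).foldl
      (fun count i => if s.getD i ' ' == k then count + checkL (s.drop i) ks else count) 0

def check (remainingStr : String) (remainingKey : String) : Int :=
  checkL remainingStr.toList remainingKey.toList

-- ===== PORT B =====
-- inner loop of Source B: builds g back to front, g[p] = g[p+1] + (f[p] if s[p]==c else 0), g[n]=0
def stepB (c : Char) : List Char → List Int → List Int
  | [], _ => [0]
  | ch :: rest, f =>
    let g := stepB c rest f.tail
    (g.headD 0 + (if ch == c then f.headD 0 else 0)) :: g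

-- Source B: f = [1]*(n+1); for c in reversed(key): f = step; return f[0]
def check_altL (s : List Char) (key : List Char) : Int :=
  (key.reverse.foldl (fun f c => stepB c s f) (List.replicate (s.length + 1) 1)).headD 0

def check_alt (remainingStr : String) (remainingKey : String) : Int :=
  check_altL remainingStr.toList remainingKey.toList

-- ===== PRECONDITION & SPEC =====
def Spec_check (remainingStr : String) (remainingKey : String) (out : Int) : Prop := out = check_alt remainingStr remainingKey
instance (remainingStr : String) (remainingKey : String) (out : Int) : Decidable (Spec_check remainingStr remainingKey out) := by unfold Spec_check; infer_instance

-- ===== CLAIM (what is proved, stated in full; the proofs are below) =====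
def Claim_equal_check : Prop := ∀ (remainingStr : String) (remainingKey : String), Dom_check remainingStr remainingKey → Spec_check remainingStr remainingKey (check remainingStr remainingKey)

-- ===== LEMMAS AND PROOFS =====

-- the intended meaning of B's rolling array: entry p is A's count on the suffix s.drop p
def Fmap (s : List Char) (key : List Char) : List Int :=
  match s with
  | [] => [checkL [] key]
  | ch :: rest => checkL (ch :: rest) key :: Fmap rest key

lemma Fmap_headD (s : List Char) (key : List Char) : (Fmap s key).headD 0 = checkL s key := by
  cases s <;> simp [Fmap]

lemma Fmap_nil (s : List Char) : Fmap s [] = List.replicate (s.length + 1) 1 := by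
  induction s with
  | nil => simp [Fmap, checkL]
  | cons ch rest ih => simp [Fmap, checkL, ih, List.replicate_succ]

lemma foldl_if_shift (v : Nat → Int) (c : Nat → Bool) (l : List Nat) (a : Int) :
    l.foldl (fun cnt i => if c i then cnt + v i else cnt) a
      = a + l.foldl (fun cnt i => if c i then cnt + v i else cnt) 0 := by
  induction l generalizing a with
  | nil => simp
  | cons x xs ih =>
    simp only [List.foldl_cons]
    rw [ih, ih (if c x then 0 + v x else 0)]
    split <;> ring

lemma checkL_cons_cons (ch k : Char) (rest ks : List Char) :
    checkL (ch :: rest) (k :: ks)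
      = (if ch == k then checkL (ch :: rest) ks else 0) + checkL rest (k :: ks) := by
  show (List.range (rest.length + 1)).foldl _ 0 = _
  rw [List.range_succ_eq_map, List.foldl_cons, List.foldl_map]
  simp only [List.getD_cons_succ, List.drop_succ_cons, List.getD_cons_zero, List.drop_zero]
  rw [foldl_if_shift (fun i => checkL (rest.drop i) ks) (fun i => rest.getD i ' ' == k)]
  simp only [zero_add]
  rfl

lemma stepB_Fmap (k : Char) (ks : List Char) (s : List Char) :
    stepB k s (Fmap s ks) = Fmap s (k :: ks) := by
  induction s with
  | nil => simp [stepB, Fmap, checkL]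
  | cons ch rest ih =>
    simp only [stepB, Fmap, List.tail_cons, ih, List.headD_cons]
    rw [Fmap_headD, checkL_cons_cons]
    rw [Int.add_comm]

lemma foldl_rev (key s : List Char) :
    key.reverse.foldl (fun f c => stepB c s f) (List.replicate (s.length + 1) 1) = Fmap s key := by
  induction key with
  | nil => simp [Fmap_nil]
  | cons k ks ih =>
    rw [List.reverse_cons, List.foldl_append, ih]
    simp [stepB_Fmap]

lemma checkL_eq_alt (s key : List Char) : check_altL s key = checkL s key := by
  unfold check_altL
  rw [foldl_rev, Fmap_headD]

-- ===== VERDICT (by name: the statement is the Claim_ definition above) =====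
theorem check_spec : Claim_equal_check := by
  intro s k _
  unfold Spec_check check check_alt
  exact (checkL_eq_alt _ _).symm
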